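-- pv_equiv track=rewrite | github.com/sleepyseal/Leetcode | min_piece.py | min_pieces
-- ===== SOURCE A (Python) =====
-- def contain(list1,list2):
--     flag = False
--     for i in range(len(list2) - len(list1) + 1):
--         if list2[i: i+len(list1)] == list1:
--             flag = True
--             break
--     return flag
--
-- def min_pieces(original, desired):
--     i=0
--     cut=0
--     while i <len(original):
--         min_len=2
--         sub_o=original[i:i+min_len]
--         while contain(sub_o, desired):
--             if i+min_len>=len(original):
--                 break
--             min_len+=1
--             sub_o=original[i:i+min_len]
--         if i+min_len<len(original):
--             cut+=1
--         i=i+min_len-1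
--     return cut+1
-- ===== SOURCE B (Python) =====
-- def min_pieces(original, desired):
--     # One pass per piece: for each occurrence of original[i] in desired, extend a
--     # longest-common-prefix match once, instead of re-scanning all of desired for
--     # every candidate piece length.
--     n, m = len(original), len(desired)
--     cut = 0
--     i = 0
--     while i < n:
--         best = 0
--         for p in range(m):
--             if desired[p] == original[i]:
--                 t = 1
--                 while i + t < n and p + t < m and desired[p + t] == original[i + t]:
--                     t += 1
--                 if t > best:
--                     best = t
--         L = min(best + 1, n - i)
--         if L < 2:
--             L = 2
--         if L < n - i:
--             cut += 1
--         i += L - 1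
--     return cut + 1
-- ===== Notes on version B (the rewrite author's own statement) =====
-- stated objective: faster
-- what changed: Instead of re-scanning all of desired with a fresh substring search for every candidate piece length (A), B scans desired once per piece: at each occurrence of original[i] it extends a longest-common-prefix match a single time, and derives the greedy piece length from the maximum extension.
import Mathlib
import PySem

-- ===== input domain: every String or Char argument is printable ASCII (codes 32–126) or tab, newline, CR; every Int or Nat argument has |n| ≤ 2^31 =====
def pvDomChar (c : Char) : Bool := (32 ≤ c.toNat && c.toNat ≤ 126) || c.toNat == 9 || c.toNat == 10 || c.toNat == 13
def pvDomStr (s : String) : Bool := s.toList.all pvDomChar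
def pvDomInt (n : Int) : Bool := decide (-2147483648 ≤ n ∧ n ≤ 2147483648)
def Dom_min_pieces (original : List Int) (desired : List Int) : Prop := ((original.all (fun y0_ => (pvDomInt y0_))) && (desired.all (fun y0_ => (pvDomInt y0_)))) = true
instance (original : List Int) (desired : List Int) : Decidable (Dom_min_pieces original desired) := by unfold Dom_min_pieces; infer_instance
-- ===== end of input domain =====

-- B replaces A's per-length substring re-search of `desired` by a single
-- longest-common-prefix extension at each occurrence of original[i] (measured faster).


-- ===== PORT A =====
def containGo (list1 list2 : List Int) : List Int → Bool
  | [] => false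
  | p :: rest =>
      if PySem.List.slice list2 (some p) (some (p + (list1.length : Int))) = list1 then true
      else containGo list1 list2 rest

def contain (list1 list2 : List Int) : Bool :=
  containGo list1 list2 (PySem.List.pyRange 0 ((list2.length : Int) - (list1.length : Int) + 1) 1)

def innerA (original desired : List Int) (i L : Int) : Int :=
  if contain (PySem.List.slice original (some i) (some (i + L))) desired then
    if i + L ≥ (original.length : Int) then L
    else innerA original desired i (L + 1)
  else L
termination_by ((original.length : Int) - (i + L)).toNat
decreasing_by omega

-- needed only so that loopA's termination can cite it
theorem innerA_ge (o d : List Int) (i L : Int) : L ≤ innerA o d i L := by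
  fun_induction innerA <;> omega

def loopA (original desired : List Int) (i cut : Int) : Int :=
  if i < (original.length : Int) then
    let L := innerA original desired i 2
    loopA original desired (i + (L - 1))
      (if i + L < (original.length : Int) then cut + 1 else cut)
  else cut + 1
termination_by ((original.length : Int) - i).toNat
decreasing_by have := innerA_ge original desired i 2; omega

def min_pieces (original : List Int) (desired : List Int) : Int :=
  loopA original desired 0 0

-- ===== PORT B =====
def extB (original desired : List Int) (i p t : Int) : Int :=
  if i + t < (original.length : Int) ∧ p + t < (desired.length : Int) ∧
     PySem.List.pyGet? desired (p + t) = PySem.List.pyGet? original (i + t) then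
    extB original desired i p (t + 1)
  else t
termination_by ((original.length : Int) - (i + t)).toNat
decreasing_by omega

def bestB (original desired : List Int) (i : Int) : Int :=
  (PySem.List.pyRange 0 (desired.length : Int) 1).foldl
    (fun best p =>
      if PySem.List.pyGet? desired p = PySem.List.pyGet? original i then
        let t := extB original desired i p 1
        if t > best then t else best
      else best) 0

def loopB (original desired : List Int) (i cut : Int) : Int :=
  if i < (original.length : Int) then
    let best := bestB original desired i
    let L0 := min (best + 1) ((original.length : Int) - i)
    let L := if L0 < 2 then 2 else L0
    loopB original desired (i + (L - 1))
      (if L < (original.length : Int) - i then cut + 1 else cut)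
  else cut + 1
termination_by ((original.length : Int) - i).toNat
decreasing_by split <;> omega

def min_pieces_alt (original : List Int) (desired : List Int) : Int :=
  loopB original desired 0 0

-- ===== PRECONDITION & SPEC =====
def Spec_min_pieces (original : List Int) (desired : List Int) (out : Int) : Prop := out = min_pieces_alt original desired
instance (original : List Int) (desired : List Int) (out : Int) : Decidable (Spec_min_pieces original desired out) := by unfold Spec_min_pieces; infer_instance

-- ===== CLAIM (what is proved, stated in full; the proofs are below) =====
def Claim_equal_min_pieces : Prop := ∀ (original : List Int) (desired : List Int), Dom_min_pieces original desired → Spec_min_pieces original desired (min_pieces original desired)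

-- ===== LEMMAS AND PROOFS =====

-- mlen xs ys = length of the longest common prefix of xs and ys (proof-side helper)
def mlen : List Int → List Int → Nat
  | x :: xs, y :: ys => if x = y then mlen xs ys + 1 else 0
  | _, _ => 0

@[simp] theorem mlen_nil (ys : List Int) : mlen [] ys = 0 := by cases ys <;> rfl
@[simp] theorem mlen_nil_right (xs : List Int) : mlen xs [] = 0 := by cases xs <;> rfl

theorem mlen_le_left (xs ys : List Int) : mlen xs ys ≤ xs.length := by
  fun_induction mlen <;> simp_all

theorem le_mlen_iff (t : Nat) (xs ys : List Int) :
    t ≤ mlen xs ys ↔ t ≤ xs.length ∧ t ≤ ys.length ∧ ∀ j < t, xs[j]? = ys[j]? := by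
  induction xs generalizing ys t with
  | nil =>
    simp only [mlen_nil, List.length_nil, Nat.le_zero, List.getElem?_nil]
    constructor
    · rintro rfl
      exact ⟨rfl, Nat.zero_le _, fun j hj => absurd hj (by omega)⟩
    · rintro ⟨h, -, -⟩; omega
  | cons x xs ih =>
    cases ys with
    | nil =>
      simp only [mlen_nil_right, List.length_nil, Nat.le_zero, List.getElem?_nil]
      constructor
      · rintro rfl
        exact ⟨Nat.zero_le _, rfl, fun j hj => absurd hj (by omega)⟩
      · rintro ⟨-, h, -⟩; omega
    | cons y ys =>
      cases t with
      | zero => simp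
      | succ t =>
        by_cases hxy : x = y
        · subst hxy
          constructor
          · intro h
            have h' : t ≤ mlen xs ys := by
              simp only [mlen, if_true] at h
              omega
            obtain ⟨h1, h2, h3⟩ := (ih t ys).1 h'
            refine ⟨by simp; omega, by simp; omega, ?_⟩
            intro j hj
            cases j with
            | zero => simp
            | succ j => simpa using h3 j (by omega)
          · rintro ⟨h1, h2, h3⟩
            have h' : t ≤ mlen xs ys := (ih t ys).2
              ⟨by simp at h1; omega, by simp at h2; omega,
               fun j hj => by simpa using h3 (j + 1) (by omega)⟩
            simp only [mlen, if_true]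

            omega
        · constructor
          · intro h
            simp [mlen, hxy] at h
          · rintro ⟨-, -, h3⟩
            exact absurd (by simpa using h3 0 (by omega)) hxy

theorem le_mlen_iff_take (t : Nat) (xs ys : List Int) :
    t ≤ mlen xs ys ↔ t ≤ xs.length ∧ t ≤ ys.length ∧ xs.take t = ys.take t := by
  rw [le_mlen_iff]
  constructor
  · rintro ⟨h1, h2, h3⟩
    refine ⟨h1, h2, List.ext_getElem? fun j => ?_⟩
    rcases lt_or_ge j t with hj | hj
    · rw [List.getElem?_take_of_lt hj, List.getElem?_take_of_lt hj, h3 j hj]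
    · rw [List.getElem?_take, List.getElem?_take]; simp [Nat.not_lt.2 hj]
  · rintro ⟨h1, h2, h3⟩
    refine ⟨h1, h2, fun j hj => ?_⟩
    have := congrArg (fun l => l[j]?) h3
    simpa [List.getElem?_take_of_lt hj] using this

theorem containGo_iff (l1 l2 : List Int) (ps : List Int) :
    containGo l1 l2 ps = true ↔
      ∃ p ∈ ps, PySem.List.slice l2 (some p) (some (p + (l1.length : Int))) = l1 := by
  induction ps with
  | nil => simp [containGo]
  | cons p rest ih =>
    simp only [containGo]
    split_ifs with h
    · simp only [true_iff]
      exact ⟨p, by simp, h⟩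
    · rw [ih]
      constructor
      · rintro ⟨q, hq, he⟩; exact ⟨q, by simp [hq], he⟩
      · rintro ⟨q, hq, he⟩
        rcases List.mem_cons.1 hq with rfl | hq
        · exact absurd he h
        · exact ⟨q, hq, he⟩

theorem contain_iff_mlen (o d : List Int) (i t : Nat)
    (ht : 1 ≤ t) (hle : i + t ≤ o.length) :
    contain ((o.drop i).take t) d = true ↔ ∃ p : Nat, t ≤ mlen (o.drop i) (d.drop p) := by
  have hlen : ((o.drop i).take t).length = t := by simp; omega
  rw [contain, containGo_iff, hlen]
  constructor
  · rintro ⟨p, hp, he⟩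
    rw [PySem.List.mem_pyRange_one] at hp
    obtain ⟨hp0, hpb⟩ := hp
    lift p to Nat using hp0 with pn
    rw [PySem.List.slice_natCast_add] at he
    refine ⟨pn, (le_mlen_iff_take t _ _).2 ⟨by simp; omega, ?_, ?_⟩⟩
    · simp only [List.length_drop]; omega
    · exact he.symm
  · rintro ⟨pn, hm⟩
    have h1 := (le_mlen_iff_take t _ _).1 hm
    obtain ⟨ha, hb, hc⟩ := h1
    simp only [List.length_drop] at hb
    refine ⟨(pn : Int), ?_, ?_⟩
    · rw [PySem.List.mem_pyRange_one]
      constructor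
      · positivity
      · omega
    · rw [PySem.List.slice_natCast_add]
      exact hc.symm

def bigM (o d : List Int) (i : Nat) : Nat :=
  (List.range d.length).foldl
    (fun b p => if d[p]? = o[i]? then max b (mlen (o.drop i) (d.drop p)) else b) 0

-- the extB loop condition is exactly "the match extends to length t + 1"
theorem extB_cond_iff (o d : List Int) (i p t : Nat)
    (hm : t ≤ mlen (o.drop i) (d.drop p)) :
    ((i : Int) + t < (o.length : Int) ∧ (p : Int) + t < (d.length : Int) ∧
      PySem.List.pyGet? d ((p : Int) + t) = PySem.List.pyGet? o ((i : Int) + t)) ↔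
    t + 1 ≤ mlen (o.drop i) (d.drop p) := by
  have hget : ∀ (l : List Int) (a b : Nat), PySem.List.pyGet? l ((a : Int) + b) = l[a + b]? := by
    intro l a b
    have : (a : Int) + b = ((a + b : Nat) : Int) := by push_cast; ring
    rw [this, PySem.List.pyGet?_natCast]
  constructor
  · rintro ⟨h1, h2, h3⟩
    rw [le_mlen_iff] at hm ⊢
    obtain ⟨ha, hb, hc⟩ := hm
    refine ⟨by simp; omega, by simp; omega, ?_⟩
    intro j hj
    rcases Nat.lt_succ_iff_lt_or_eq.1 hj with hj | rfl
    · exact hc j hj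
    · rw [hget, hget] at h3
      rw [List.getElem?_drop, List.getElem?_drop, h3]
  · intro h
    rw [le_mlen_iff] at h
    obtain ⟨ha, hb, hc⟩ := h
    simp only [List.length_drop] at ha hb
    refine ⟨by omega, by omega, ?_⟩
    rw [hget, hget]
    have := hc t (by omega)
    rw [List.getElem?_drop, List.getElem?_drop] at this
    exact this.symm

theorem extB_eq (o d : List Int) (i p t : Nat) (hm : t ≤ mlen (o.drop i) (d.drop p)) :
    extB o d (i : Int) (p : Int) (t : Int) = (mlen (o.drop i) (d.drop p) : Int) := by
  obtain ⟨k, hk⟩ : ∃ k, mlen (o.drop i) (d.drop p) = t + k := ⟨mlen (o.drop i) (d.drop p) - t, by omega⟩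
  induction k generalizing t with
  | zero =>
    have hk0 : ¬ (t + 1 ≤ mlen (o.drop i) (d.drop p)) := by omega
    have hc := (extB_cond_iff o d i p t hm).not.2 hk0
    rw [extB, if_neg hc]
    omega
  | succ k ih =>
    have hk1 : t + 1 ≤ mlen (o.drop i) (d.drop p) := by omega
    have hc := (extB_cond_iff o d i p t hm).2 hk1
    rw [extB, if_pos hc]
    have : (t : Int) + 1 = ((t + 1 : Nat) : Int) := by push_cast; ring
    rw [this]
    exact ih (t + 1) (by omega) (by omega)

theorem one_le_mlen_of_head (o d : List Int) (i p : Nat) (hi : i < o.length)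
    (hp : p < d.length) (h : d[p]? = o[i]?) : 1 ≤ mlen (o.drop i) (d.drop p) := by
  rw [le_mlen_iff]
  refine ⟨by simp; omega, by simp; omega, ?_⟩
  intro j hj
  interval_cases j
  rw [List.getElem?_drop, List.getElem?_drop]
  simpa using h.symm

theorem bestB_eq_bigM (o d : List Int) (i : Nat) (hi : i < o.length) :
    bestB o d (i : Int) = (bigM o d i : Int) := by
  rw [bestB, bigM, PySem.List.pyRange_zero_natCast, List.foldl_map]
  suffices h : ∀ (l : List Nat) (b : Nat), (∀ p ∈ l, p < d.length) →
      l.foldl (fun best p =>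
        if PySem.List.pyGet? d ((p : Nat) : Int) = PySem.List.pyGet? o (i : Int) then
          let t := extB o d (i : Int) ((p : Nat) : Int) 1
          if t > best then t else best
        else best) (b : Int)
      = ((l.foldl (fun b p => if d[p]? = o[i]? then max b (mlen (o.drop i) (d.drop p)) else b) b : Nat) : Int) by
    exact h (List.range d.length) 0 (by simp)
  intro l
  induction l with
  | nil => intro b _; rfl
  | cons p rest ih =>
    intro b hmem
    simp only [List.foldl_cons]
    have hpg : (PySem.List.pyGet? d ((p : Nat) : Int) = PySem.List.pyGet? o ((i : Nat) : Int)) ↔ d[p]? = o[i]? := by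
      rw [PySem.List.pyGet?_natCast, PySem.List.pyGet?_natCast]
    by_cases h : d[p]? = o[i]?
    · rw [if_pos (hpg.2 h), if_pos h]
      have hp : p < d.length := hmem p (by simp)
      have h1 : 1 ≤ mlen (o.drop i) (d.drop p) := one_le_mlen_of_head o d i p hi hp h
      have he : extB o d (i : Int) (p : Int) 1 = (mlen (o.drop i) (d.drop p) : Int) := by
        have h2 : (1 : Int) = ((1 : Nat) : Int) := rfl
        rw [h2, extB_eq o d i p 1 h1]
      have harg : (let t := extB o d (i : Int) ((p : Nat) : Int) 1;
          if t > ((b : Nat) : Int) then t else ((b : Nat) : Int)) = ((max b (mlen (o.drop i) (d.drop p)) : Nat) : Int) := by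
        show (if extB o d (i : Int) ((p : Nat) : Int) 1 > ((b : Nat) : Int) then extB o d (i : Int) ((p : Nat) : Int) 1 else ((b : Nat) : Int)) = _
        rw [he]
        split_ifs <;> push_cast <;> omega
      rw [harg]
      exact ih _ (fun q hq => hmem q (by simp [hq]))
    · rw [if_neg (hpg.not.2 h), if_neg h]
      exact ih _ (fun q hq => hmem q (by simp [hq]))

theorem bigM_le (o d : List Int) (i : Nat) : bigM o d i ≤ o.length - i := by
  rw [bigM]
  suffices h : ∀ (l : List Nat) (b : Nat), b ≤ o.length - i →
      l.foldl (fun b p => if d[p]? = o[i]? then max b (mlen (o.drop i) (d.drop p)) else b) b ≤ o.length - i by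
    exact h _ 0 (by omega)
  intro l
  induction l with
  | nil => intro b hb; exact hb
  | cons p rest ih =>
    intro b hb
    simp only [List.foldl_cons]
    split_ifs with h
    · refine ih _ ?_
      have := mlen_le_left (o.drop i) (d.drop p)
      simp only [List.length_drop] at this
      omega
    · exact ih _ hb

theorem le_bigM_iff (o d : List Int) (i t : Nat) (ht : 1 ≤ t) (hi : i < o.length) :
    t ≤ bigM o d i ↔ ∃ p : Nat, t ≤ mlen (o.drop i) (d.drop p) := by
  rw [bigM]
  have key : ∀ (l : List Nat) (b : Nat),
      t ≤ l.foldl (fun b p => if d[p]? = o[i]? then max b (mlen (o.drop i) (d.drop p)) else b) b ↔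
      t ≤ b ∨ ∃ p ∈ l, d[p]? = o[i]? ∧ t ≤ mlen (o.drop i) (d.drop p) := by
    intro l
    induction l with
    | nil => simp
    | cons p rest ih =>
      intro b
      simp only [List.foldl_cons, List.mem_cons]
      split_ifs with h
      · rw [ih, le_max_iff]
        constructor
        · rintro ((hb | hm) | ⟨q, hq, hcq, hmq⟩)
          · exact Or.inl hb
          · exact Or.inr ⟨p, Or.inl rfl, h, hm⟩
          · exact Or.inr ⟨q, Or.inr hq, hcq, hmq⟩
        · rintro (hb | ⟨q, hq, hcq, hmq⟩)
          · exact Or.inl (Or.inl hb)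
          · rcases hq with rfl | hq
            · exact Or.inl (Or.inr hmq)
            · exact Or.inr ⟨q, hq, hcq, hmq⟩
      · rw [ih]
        constructor
        · rintro (hb | ⟨q, hq, hcq, hmq⟩)
          · exact Or.inl hb
          · exact Or.inr ⟨q, Or.inr hq, hcq, hmq⟩
        · rintro (hb | ⟨q, hq, hcq, hmq⟩)
          · exact Or.inl hb
          · rcases hq with rfl | hq
            · exact absurd hcq h
            · exact Or.inr ⟨q, hq, hcq, hmq⟩
  rw [key]
  constructor
  · rintro (hb | ⟨p, _, _, hm⟩)
    · omega
    · exact ⟨p, hm⟩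
  · rintro ⟨p, hm⟩
    have hp : p < d.length := by
      by_contra hc
      have hnil : d.drop p = [] := List.drop_eq_nil_of_le (by omega)
      rw [hnil, mlen_nil_right] at hm
      omega
    have hhead : d[p]? = o[i]? := by
      rw [le_mlen_iff] at hm
      have := hm.2.2 0 (by omega)
      rw [List.getElem?_drop, List.getElem?_drop] at this
      simpa using this.symm
    exact Or.inr ⟨p, List.mem_range.2 hp, hhead, hm⟩

theorem innerA_loop (o d : List Int) (i : Nat) (hi : i < o.length)
    (h3 : i + 2 < o.length) (k t : Nat) (ht : 2 ≤ t)
    (hk : t + k = max 2 (min (bigM o d i + 1) (o.length - i))) :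
    innerA o d (i : Int) (t : Int) = (max 2 (min (bigM o d i + 1) (o.length - i)) : Int) := by
  have hcont : ∀ s : Nat, 1 ≤ s → i + s ≤ o.length →
      (contain ((o.drop i).take s) d = true ↔ s ≤ bigM o d i) := fun s h1 h2 =>
    (contain_iff_mlen o d i s h1 h2).trans (le_bigM_iff o d i s h1 hi).symm
  have hble := bigM_le o d i
  induction k generalizing t with
  | zero =>
    rw [innerA, PySem.List.slice_natCast_add]
    by_cases hTM : t ≤ bigM o d i
    · rw [if_pos ((hcont t (by omega) (by omega)).2 hTM), if_pos (by omega)]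
      omega
    · rw [if_neg ((hcont t (by omega) (by omega)).not.2 hTM)]
      omega
  | succ k ih =>
    rw [innerA, PySem.List.slice_natCast_add]
    rw [if_pos ((hcont t (by omega) (by omega)).2 (by omega)), if_neg (by omega)]
    have : (t : Int) + 1 = ((t + 1 : Nat) : Int) := by push_cast; ring
    rw [this]
    exact ih (t + 1) (by omega) (by omega)

theorem innerA_eq (o d : List Int) (i : Nat) (hi : i < o.length) :
    innerA o d (i : Int) 2 =
      (max 2 (min (bigM o d i + 1) (o.length - i)) : Int) := by
  by_cases h3 : i + 2 < o.length
  · have h2 : ((2 : Nat) : Int) = (2 : Int) := rfl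
    rw [← h2]
    exact innerA_loop o d i hi h3 (max 2 (min (bigM o d i + 1) (o.length - i)) - 2) 2
      (le_refl 2) (by omega)
  · -- near the right edge the loop returns 2 whatever contain says
    have hT : max 2 (min ((bigM o d i : Int) + 1) ((o.length : Int) - (i : Int))) = 2 := by omega
    rw [hT, innerA]
    split_ifs with hc hge
    · rfl
    · exfalso; push_cast at hge; omega
    · rfl

theorem loopA_eq_loopB (o d : List Int) (i cut : Int) (hi : 0 ≤ i) :
    loopA o d i cut = loopB o d i cut := by
  rw [loopA, loopB]
  by_cases h : i < (o.length : Int)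
  · rw [if_pos h, if_pos h]
    have hiN : i = ((i.toNat : Nat) : Int) := by omega
    have hilt : i.toNat < o.length := by omega
    have hA : innerA o d i 2 = (max 2 (min (bigM o d i.toNat + 1) (o.length - i.toNat)) : Int) := by
      rw [hiN]; exact innerA_eq o d i.toNat hilt
    have hB : bestB o d i = (bigM o d i.toNat : Int) := by
      rw [hiN]; exact bestB_eq_bigM o d i.toNat hilt
    simp only [hA, hB]
    have hble := bigM_le o d i.toNat
    have harg : (if min ((bigM o d i.toNat : Int) + 1) ((o.length : Int) - i) < 2 then (2 : Int)
        else min ((bigM o d i.toNat : Int) + 1) ((o.length : Int) - i))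
        = (max 2 (min (bigM o d i.toNat + 1) (o.length - i.toNat)) : Int) := by
      split_ifs <;> omega
    rw [harg]
    have hcut : (if i + (max 2 (min (bigM o d i.toNat + 1) (o.length - i.toNat)) : Int) < (o.length : Int) then cut + 1 else cut)
        = (if (max 2 (min (bigM o d i.toNat + 1) (o.length - i.toNat)) : Int) < (o.length : Int) - i then cut + 1 else cut) := by
      split_ifs <;> omega
    rw [hcut]
    have hTT2 : (2 : Int) ≤ (max 2 (min (bigM o d i.toNat + 1) (o.length - i.toNat)) : Int) := by
      omega
    exact loopA_eq_loopB o d (i + ((max 2 (min (bigM o d i.toNat + 1) (o.length - i.toNat)) : Int) - 1)) _ (by omega)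
  · rw [if_neg h, if_neg h]
termination_by ((o.length : Int) - i).toNat
decreasing_by omega

-- ===== VERDICT (by name: the statement is the Claim_ definition above) =====
theorem min_pieces_spec : Claim_equal_min_pieces := by
  intro original desired _
  unfold Spec_min_pieces min_pieces min_pieces_alt
  exact loopA_eq_loopB original desired 0 0 le_rfl
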